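-- pv_equiv track=rewrite | github.com/tony2020edx/dev | testcase.py | smallest_substring
-- ===== SOURCE A (Python) =====
-- def smallest_substring(text):
--     res = []
--
--     for i in range(len(text)):
--         for j in range(i + 1, len(text) + 1):
--             if len(text[i:j]) >= 2 and text[i:j].count('a') > text[i:j].count('b') and text[i:j].count('a') > text[i:j].count('c'):
--                 res.append(text[i:j])
--
--     if len(res) == 0:
--         return -1
--     else:
--         return len(min(res))
-- ===== SOURCE B (Python) =====
-- def smallest_substring(text):
--     # For each start i, the qualifying substrings starting at i are nested
--     # prefixes, so the lexicographically smallest one is the shortest one: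
--     # scan forward with incremental counters and stop at the first hit.
--     n = len(text)
--     best = None
--     for i in range(n):
--         a = b = c = 0
--         for j in range(i, n):
--             ch = text[j]
--             if ch == 'a':
--                 a += 1
--             elif ch == 'b':
--                 b += 1
--             elif ch == 'c':
--                 c += 1
--             if j > i and a > b and a > c:
--                 cand = text[i:j + 1]
--                 if best is None or cand < best:
--                     best = cand
--                 break
--     return -1 if best is None else len(best)
-- ===== Notes on version B (the rewrite author's own statement) =====
-- stated objective: faster
-- what changed: A enumerates every substring, re-slices and re-counts it, collects all qualifying ones and takes len(min(list)); B does one forward scan per start with incremental a/b/c counters, stops at the first qualifying substring from that start (the per-start candidates are nested prefixes, so the first is also the lexicographically least) and keeps a running lexicographic best of one candidate per start.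
import Mathlib
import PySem

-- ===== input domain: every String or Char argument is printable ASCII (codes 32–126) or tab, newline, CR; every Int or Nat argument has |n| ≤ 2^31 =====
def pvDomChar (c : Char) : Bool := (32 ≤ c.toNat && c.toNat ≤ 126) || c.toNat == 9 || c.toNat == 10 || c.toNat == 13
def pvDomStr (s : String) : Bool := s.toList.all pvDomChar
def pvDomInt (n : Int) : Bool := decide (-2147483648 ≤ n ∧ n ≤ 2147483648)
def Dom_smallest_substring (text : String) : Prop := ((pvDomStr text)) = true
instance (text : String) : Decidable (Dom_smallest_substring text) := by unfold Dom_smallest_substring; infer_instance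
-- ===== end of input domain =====

-- B replaces A's enumerate-all-substrings-then-min scan (slice + recount per substring) by a
-- single forward scan per start with incremental counters that stops at the first qualifying
-- substring (the per-start candidates are nested prefixes, so the first is the lexicographic
-- least); objective: faster.

-- ===== PORT A =====
-- the nested 'for i … for j …' loops building res (each slice re-counted, as in A)
def aRes (text : String) : List String :=
  (PySem.List.pyRange 0 (PySem.Str.len text) 1).foldl
    (fun res i =>
      (PySem.List.pyRange (i + 1) (PySem.Str.len text + 1) 1).foldl
        (fun res j =>
          if 2 ≤ PySem.Str.len (PySem.Str.slice text (some i) (some j)) ∧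
             PySem.Str.count (PySem.Str.slice text (some i) (some j)) "b" <
               PySem.Str.count (PySem.Str.slice text (some i) (some j)) "a" ∧
             PySem.Str.count (PySem.Str.slice text (some i) (some j)) "c" <
               PySem.Str.count (PySem.Str.slice text (some i) (some j)) "a"
          then res ++ [PySem.Str.slice text (some i) (some j)]
          else res)
        res)
    []

def smallest_substring (text : String) : Int :=
  let res := aRes text
  if PySem.List.len res = 0 then -1
  else
    match PySem.List.min? res (fun x => x) with
    | some m => PySem.Str.len m
    | none => -1

-- ===== PORT B =====
-- B's inner 'for j' loop with break: scan the suffix, keep incremental a/b/c counters and the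
-- prefix read so far; return the first qualifying prefix (Source B's cand) or none
def bFind : List Char → List Char → Int → Int → Int → Option (List Char)
  | [], _, _, _, _ => none
  | ch :: rest, pref, a, b, c =>
    let a' := if ch = 'a' then a + 1 else a
    let b' := if ch ≠ 'a' ∧ ch = 'b' then b + 1 else b
    let c' := if ch ≠ 'a' ∧ ch ≠ 'b' ∧ ch = 'c' then c + 1 else c
    let cand := pref ++ [ch]
    if 2 ≤ cand.length ∧ b' < a' ∧ c' < a' then some cand
    else bFind rest cand a' b' c'

-- B's outer 'for i' loop: one candidate per start (= per nonempty suffix), running lexicographic best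
def bOuter : List Char → Option (List Char) → Option (List Char)
  | [], best => best
  | ch :: rest, best =>
    bOuter rest
      (match bFind (ch :: rest) [] 0 0 0 with
       | none => best
       | some cand =>
         match best with
         | none => some cand
         | some b => if cand < b then some cand else some b)

def smallest_substring_alt (text : String) : Int :=
  match bOuter text.toList none with
  | none => -1
  | some bs => (bs.length : Int)

-- ===== PRECONDITION & SPEC =====
def Spec_smallest_substring (text : String) (out : Int) : Prop := out = smallest_substring_alt text
instance (text : String) (out : Int) : Decidable (Spec_smallest_substring text out) := by unfold Spec_smallest_substring; infer_instance

-- ===== CLAIM (what is proved, stated in full; the proofs are below) =====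
def Claim_equal_smallest_substring : Prop := ∀ (text : String), Dom_smallest_substring text → Spec_smallest_substring text (smallest_substring text)

-- ===== LEMMAS AND PROOFS =====

-- the qualifying condition, on the char-list side
def pvQb (x : List Char) : Bool :=
  decide (2 ≤ x.length) && decide (x.count 'b' < x.count 'a') && decide (x.count 'c' < x.count 'a')

lemma pv_count_go_singleton (c : Char) :
    ∀ (l : List Char) (fuel acc : Nat), l.length ≤ fuel →
      PySem.Chars.count.go [c] fuel l acc = acc + l.count c := by
  intro l
  induction l with
  | nil => intro fuel acc _; cases fuel <;> simp [PySem.Chars.count.go]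
  | cons h t ih =>
    intro fuel acc hf
    cases fuel with
    | zero => simp at hf
    | succ f =>
      have hf' : t.length ≤ f := by simpa using hf
      simp only [PySem.Chars.count.go]
      by_cases hc : h = c
      · subst hc
        simp [List.isPrefixOf, ih f _ hf', List.count_cons]; omega
      · simp [List.isPrefixOf, hc, ih f _ hf', List.count_cons, Ne.symm hc]

lemma pv_count_singleton (s : List Char) (c : Char) :
    PySem.Chars.count s [c] = s.count c := by
  simp [PySem.Chars.count, pv_count_go_singleton c s s.length 0 le_rfl]

lemma pv_qual_str (x : String) :
    (2 ≤ PySem.Str.len x ∧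
     PySem.Str.count x "b" < PySem.Str.count x "a" ∧
     PySem.Str.count x "c" < PySem.Str.count x "a") ↔ pvQb x.toList = true := by
  have ha : ("a" : String).toList = ['a'] := rfl
  have hb : ("b" : String).toList = ['b'] := rfl
  have hc : ("c" : String).toList = ['c'] := rfl
  simp [pvQb, PySem.Str.count_eq, PySem.Str.len_eq, ha, hb, hc, pv_count_singleton]
  omega


lemma pv_prefix_lt (p : List Char) : ∀ (x : Char) (r : List Char), p < p ++ x :: r := by
  induction p with
  | nil => intro x r; exact List.nil_lt_cons x r
  | cons a t ih => intro x r; exact (List.cons_lt_cons_iff).mpr (Or.inr ⟨rfl, ih x r⟩)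

lemma pv_prefix_le (p q : List Char) (h : p <+: q) : p ≤ q := by
  obtain ⟨r, rfl⟩ := h
  cases r with
  | nil => simp
  | cons x r => exact le_of_lt (pv_prefix_lt p x r)

lemma pv_bFind_eq : ∀ (rest pref : List Char),
    bFind rest pref (pref.count 'a' : Int) (pref.count 'b' : Int) (pref.count 'c' : Int) =
      ((List.range rest.length).map (fun k => pref ++ rest.take (k + 1))).find? pvQb := by
  intro rest
  induction rest with
  | nil => intro pref; simp [bFind]
  | cons ch rest ih =>
    intro pref
    have hcnt : ∀ (c : Char), ((pref ++ [ch]).count c : Int) =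
        if ch = c then (pref.count c : Int) + 1 else (pref.count c : Int) := by
      intro c; by_cases h : ch = c <;> simp [List.count_append, h]
    have ha : (if ch = 'a' then (pref.count 'a' : Int) + 1 else (pref.count 'a' : Int))
        = ((pref ++ [ch]).count 'a' : Int) := (hcnt 'a').symm
    have hb : (if ch ≠ 'a' ∧ ch = 'b' then (pref.count 'b' : Int) + 1 else (pref.count 'b' : Int))
        = ((pref ++ [ch]).count 'b' : Int) := by
      rw [hcnt 'b']; by_cases h : ch = 'b'
      · subst h; simp
      · simp [h]
    have hc : (if ch ≠ 'a' ∧ ch ≠ 'b' ∧ ch = 'c' then (pref.count 'c' : Int) + 1 else (pref.count 'c' : Int))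
        = ((pref ++ [ch]).count 'c' : Int) := by
      rw [hcnt 'c']; by_cases h : ch = 'c'
      · subst h; simp
      · simp [h]
    have hrange : List.range (rest.length + 1) = 0 :: (List.range rest.length).map (· + 1) := by
      rw [List.range_succ_eq_map]
    simp only [bFind, ha, hb, hc, List.length_cons, hrange, List.map_cons, List.map_map,
      List.find?_cons]
    have hcond : (2 ≤ (pref ++ [ch]).length ∧
        ((pref ++ [ch]).count 'b' : Int) < ((pref ++ [ch]).count 'a' : Int) ∧
        ((pref ++ [ch]).count 'c' : Int) < ((pref ++ [ch]).count 'a' : Int)) ↔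
        pvQb (pref ++ [ch]) = true := by
      simp [pvQb]; omega
    by_cases hq : pvQb (pref ++ (ch :: rest).take 1) = true
    · have : pvQb (pref ++ [ch]) = true := by simpa using hq
      rw [if_pos (hcond.mpr this)]
      simp [this]
    · have h2 : ¬ (pvQb (pref ++ [ch]) = true) := by simpa using hq
      rw [if_neg (fun hh => h2 (hcond.mp hh))]
      have := ih (pref ++ [ch])
      rw [this]
      simp only [Bool.not_eq_true] at h2
      simp [h2]
      simp [Function.comp_def]

lemma pv_cand_eq (s : List Char) :
    bFind s [] 0 0 0 = ((List.range s.length).map (fun k => s.take (k + 1))).find? pvQb := by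
  have h := pv_bFind_eq s []
  simpa using h

lemma pv_cand_none (s : List Char) (h : bFind s [] 0 0 0 = none) :
    ∀ p, p <+: s → pvQb p = true → False := by
  rw [pv_cand_eq] at h
  rw [List.find?_eq_none] at h
  intro p hp hq
  have h2 : 2 ≤ p.length := by
    have := hq; simp [pvQb] at this; exact this.1.1
  have hle : p.length ≤ s.length := hp.length_le
  have heq : p = s.take p.length := by
    rw [List.prefix_iff_eq_take] at hp; exact hp
  have : s.take ((p.length - 1) + 1) ∈ (List.range s.length).map (fun k => s.take (k + 1)) := by
    refine List.mem_map.mpr ⟨p.length - 1, List.mem_range.mpr (by omega), rfl⟩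
  have := h _ this
  rw [show p.length - 1 + 1 = p.length by omega] at this
  rw [← heq] at this
  exact this hq

lemma pv_cand_some (s m : List Char) (h : bFind s [] 0 0 0 = some m) :
    m <+: s ∧ pvQb m = true ∧ ∀ p, p <+: s → pvQb p = true → m ≤ p := by
  rw [pv_cand_eq] at h
  rw [List.find?_eq_some_iff_append] at h
  obtain ⟨hqm, as, bs, hsplit, hfail⟩ := h
  -- k0 = as.length; as = range k0
  have hlen : as.length + 1 ≤ s.length := by
    have := congrArg List.length hsplit
    simp at this; omega
  have hk0 : (List.map (fun k => s.take (k + 1)) (List.range s.length))[as.length]? =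
      some (s.take (as.length + 1)) := by
    simp [List.getElem?_map, List.getElem?_range, Nat.lt_of_succ_le hlen]
  have hm : m = s.take (as.length + 1) := by
    rw [hsplit] at hk0
    rw [List.getElem?_append_right le_rfl] at hk0
    simp at hk0
    exact hk0
  have hfail' : ∀ j, j < as.length → ¬ pvQb (s.take (j + 1)) = true := by
    intro j hj
    have hjs : j < s.length := by omega
    have : (List.map (fun k => s.take (k + 1)) (List.range s.length))[j]? =
        some (s.take (j + 1)) := by
      simp [List.getElem?_map, List.getElem?_range, hjs]
    rw [hsplit, List.getElem?_append_left (by omega)] at this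
    have hmem : s.take (j + 1) ∈ as := by
      exact List.mem_of_getElem? this
    have := hfail _ hmem
    simpa using this
  refine ⟨hm ▸ List.take_prefix _ _, hqm, ?_⟩
  intro p hp hq
  have h2 : 2 ≤ p.length := by have := hq; simp [pvQb] at this; exact this.1.1
  have hle : p.length ≤ s.length := hp.length_le
  have heq : p = s.take p.length := List.prefix_iff_eq_take.mp hp
  have hge : as.length ≤ p.length - 1 := by
    by_contra hlt
    exact hfail' (p.length - 1) (by omega)
      (by rw [show p.length - 1 + 1 = p.length by omega, ← heq]; exact hq)
  have hpre : m <+: p := by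
    rw [hm, heq]
    have : (s.take p.length).take (as.length + 1) = s.take (as.length + 1) := by
      rw [List.take_take]; congr 1; omega
    exact this ▸ List.take_prefix _ _
  exact pv_prefix_le _ _ hpre

lemma pv_bOuter_none (s : List Char) : ∀ (best : Option (List Char)),
    bOuter s best = none ↔ best = none ∧ ∀ t, t <:+ s → t ≠ [] → bFind t [] 0 0 0 = none := by
  induction s with
  | nil =>
    intro best
    simp only [bOuter]
    constructor
    · intro h; exact ⟨h, by intro t ht hne; rw [List.suffix_nil.mp ht] at hne; simp at hne⟩
    · intro h; exact h.1
  | cons ch rest ih =>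
    intro best
    rw [bOuter, ih]
    constructor
    · rintro ⟨h1, h2⟩
      cases hf : bFind (ch :: rest) [] 0 0 0 with
      | some cand => rw [hf] at h1; cases best <;> simp at h1 <;> split at h1 <;> simp at h1
      | none =>
        rw [hf] at h1
        refine ⟨h1, ?_⟩
        intro t ht hne
        rcases List.suffix_cons_iff.mp ht with rfl | ht'
        · exact hf
        · exact h2 t ht' hne
    · rintro ⟨h1, h2⟩
      have hf : bFind (ch :: rest) [] 0 0 0 = none := h2 _ (by rfl) (by simp)
      rw [hf, h1]
      exact ⟨rfl, fun t ht hne => h2 t (ht.trans (List.suffix_cons ch rest)) hne⟩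

lemma pv_bOuter_some (s : List Char) : ∀ (best : Option (List Char)) (m : List Char),
    bOuter s best = some m →
    ((∃ t, t <:+ s ∧ bFind t [] 0 0 0 = some m) ∨ best = some m) ∧
    (∀ b0, best = some b0 → m ≤ b0) ∧
    (∀ t c, t <:+ s → bFind t [] 0 0 0 = some c → m ≤ c) := by
  induction s with
  | nil =>
    intro best m h
    simp only [bOuter] at h
    refine ⟨Or.inr h, fun b0 hb => by rw [h] at hb; exact (Option.some_inj.mp hb) ▸ le_rfl, ?_⟩
    intro t c ht hf
    rw [List.suffix_nil.mp ht] at hf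
    simp [bFind] at hf
  | cons ch rest ih =>
    intro best m h
    rw [bOuter] at h
    -- name the new best
    cases hf : bFind (ch :: rest) [] 0 0 0 with
    | none =>
      rw [hf] at h
      obtain ⟨hmem, hle, hsuf⟩ := ih best m h
      refine ⟨?_, hle, ?_⟩
      · rcases hmem with ⟨t, ht, htf⟩ | hb
        · exact Or.inl ⟨t, ht.trans (List.suffix_cons ch rest), htf⟩
        · exact Or.inr hb
      · intro t c ht hcf
        rcases List.suffix_cons_iff.mp ht with rfl | ht'
        · rw [hf] at hcf; simp at hcf
        · exact hsuf t c ht' hcf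
    | some cand =>
      rw [hf] at h
      cases best with
      | none =>
        have h : bOuter rest (some cand) = some m := h
        obtain ⟨hmem, hle, hsuf⟩ := ih (some cand) m h
        have hmc : m ≤ cand := hle cand rfl
        refine ⟨?_, by simp, ?_⟩
        · rcases hmem with ⟨t, ht, htf⟩ | hb
          · exact Or.inl ⟨t, ht.trans (List.suffix_cons ch rest), htf⟩
          · exact Or.inl ⟨ch :: rest, by rfl, by rw [hf, Option.some_inj.mp hb]⟩
        · intro t c ht hcf
          rcases List.suffix_cons_iff.mp ht with rfl | ht'
          · rw [hf] at hcf; exact (Option.some_inj.mp hcf) ▸ hmc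
          · exact hsuf t c ht' hcf
      | some b =>
        have h : bOuter rest (if cand < b then some cand else some b) = some m := h
        by_cases hlt : cand < b
        · rw [if_pos hlt] at h
          obtain ⟨hmem, hle, hsuf⟩ := ih (some cand) m h
          have hmc : m ≤ cand := hle cand rfl
          refine ⟨?_, ?_, ?_⟩
          · rcases hmem with ⟨t, ht, htf⟩ | hb
            · exact Or.inl ⟨t, ht.trans (List.suffix_cons ch rest), htf⟩
            · exact Or.inl ⟨ch :: rest, by rfl, by rw [hf, Option.some_inj.mp hb]⟩
          · intro b0 hb0
            rw [← Option.some_inj.mp hb0]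
            exact hmc.trans (le_of_lt hlt)
          · intro t c ht hcf
            rcases List.suffix_cons_iff.mp ht with rfl | ht'
            · rw [hf] at hcf; exact (Option.some_inj.mp hcf) ▸ hmc
            · exact hsuf t c ht' hcf
        · rw [if_neg hlt] at h
          obtain ⟨hmem, hle, hsuf⟩ := ih (some b) m h
          have hmb : m ≤ b := hle b rfl
          have hbc : b ≤ cand := not_lt.mp hlt
          refine ⟨?_, ?_, ?_⟩
          · rcases hmem with ⟨t, ht, htf⟩ | hb
            · exact Or.inl ⟨t, ht.trans (List.suffix_cons ch rest), htf⟩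
            · exact Or.inr hb
          · intro b0 hb0
            rw [← Option.some_inj.mp hb0]
            exact hmb
          · intro t c ht hcf
            rcases List.suffix_cons_iff.mp ht with rfl | ht'
            · rw [hf] at hcf
              exact (Option.some_inj.mp hcf) ▸ (hmb.trans hbc)
            · exact hsuf t c ht' hcf

lemma pv_mem_aRes (text : String) (x : String) :
    x ∈ aRes text ↔ (x.toList <:+: text.toList ∧ pvQb x.toList = true) := by
  have hinner : ∀ (i : Int) (res : List String),
      (PySem.List.pyRange (i + 1) (PySem.Str.len text + 1) 1).foldl
        (fun res j =>
          if 2 ≤ PySem.Str.len (PySem.Str.slice text (some i) (some j)) ∧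
             PySem.Str.count (PySem.Str.slice text (some i) (some j)) "b" <
               PySem.Str.count (PySem.Str.slice text (some i) (some j)) "a" ∧
             PySem.Str.count (PySem.Str.slice text (some i) (some j)) "c" <
               PySem.Str.count (PySem.Str.slice text (some i) (some j)) "a"
          then res ++ [PySem.Str.slice text (some i) (some j)]
          else res)
        res
      = res ++ ((PySem.List.pyRange (i + 1) (PySem.Str.len text + 1) 1).filter
          (fun j => pvQb (PySem.Str.slice text (some i) (some j)).toList)).map
            (fun j => PySem.Str.slice text (some i) (some j)) := by
    intro i res
    have hfun : (fun (res : List String) (j : Int) =>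
        if 2 ≤ PySem.Str.len (PySem.Str.slice text (some i) (some j)) ∧
           PySem.Str.count (PySem.Str.slice text (some i) (some j)) "b" <
             PySem.Str.count (PySem.Str.slice text (some i) (some j)) "a" ∧
           PySem.Str.count (PySem.Str.slice text (some i) (some j)) "c" <
             PySem.Str.count (PySem.Str.slice text (some i) (some j)) "a"
        then res ++ [PySem.Str.slice text (some i) (some j)]
        else res)
        = (fun res j =>
          if (fun j => pvQb (PySem.Str.slice text (some i) (some j)).toList) j = true
          then res ++ [PySem.Str.slice text (some i) (some j)]
          else res) := by
      funext res j
      by_cases h : pvQb (PySem.Str.slice text (some i) (some j)).toList = true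
      · rw [if_pos ((pv_qual_str _).mpr h), if_pos h]
      · rw [if_neg (fun hh => h ((pv_qual_str _).mp hh)), if_neg h]
    rw [hfun, PySem.List.foldl_append_if]
  have houter : aRes text =
      (PySem.List.pyRange 0 (PySem.Str.len text) 1).flatMap
        (fun i => ((PySem.List.pyRange (i + 1) (PySem.Str.len text + 1) 1).filter
          (fun j => pvQb (PySem.Str.slice text (some i) (some j)).toList)).map
            (fun j => PySem.Str.slice text (some i) (some j))) := by
    unfold aRes
    have : (fun (res : List String) (i : Int) =>
        (PySem.List.pyRange (i + 1) (PySem.Str.len text + 1) 1).foldl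
          (fun res j =>
            if 2 ≤ PySem.Str.len (PySem.Str.slice text (some i) (some j)) ∧
               PySem.Str.count (PySem.Str.slice text (some i) (some j)) "b" <
                 PySem.Str.count (PySem.Str.slice text (some i) (some j)) "a" ∧
               PySem.Str.count (PySem.Str.slice text (some i) (some j)) "c" <
                 PySem.Str.count (PySem.Str.slice text (some i) (some j)) "a"
            then res ++ [PySem.Str.slice text (some i) (some j)]
            else res)
          res)
        = (fun res i => res ++ ((PySem.List.pyRange (i + 1) (PySem.Str.len text + 1) 1).filter
            (fun j => pvQb (PySem.Str.slice text (some i) (some j)).toList)).map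
              (fun j => PySem.Str.slice text (some i) (some j))) := by
      funext res i; exact hinner i res
    rw [this, PySem.List.foldl_append_eq_flatMap]
    simp
  have hn : PySem.Str.len text = (text.toList.length : Int) := by simp [PySem.Str.len_eq]
  have hslice : ∀ (i j : Int), 0 ≤ i → 0 ≤ j →
      (PySem.Str.slice text (some i) (some j)).toList =
        (text.toList.drop i.toNat).take (j.toNat - i.toNat) := by
    intro i j hi hj
    rw [PySem.Str.toList_slice, PySem.Chars.slice_eq_listSlice,
      PySem.List.slice_toNat _ hi hj]
  rw [houter]
  simp only [List.mem_flatMap, List.mem_map, List.mem_filter, PySem.List.mem_pyRange_one]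
  constructor
  · rintro ⟨i, ⟨hi0, hilt⟩, xx, ⟨⟨hj1, hj2⟩, hq⟩, rfl⟩
    refine ⟨?_, hq⟩
    rw [hslice i xx hi0 (by omega)]
    exact List.infix_iff_prefix_suffix.mpr
      ⟨text.toList.drop i.toNat, List.take_prefix _ _, List.drop_suffix _ _⟩
  · rintro ⟨hinf, hq⟩
    obtain ⟨pre, suf, hdecomp⟩ := hinf
    have h2 : 2 ≤ x.toList.length := by
      have h2' : 2 ≤ x.length := by simp [pvQb] at hq; omega
      rw [String.length_toList]; exact h2'
    have hlen : text.toList.length = pre.length + x.toList.length + suf.length := by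
      rw [← hdecomp]; simp; omega
    refine ⟨(pre.length : Int), ⟨by positivity, by rw [hn]; exact_mod_cast by omega⟩,
      ((pre.length + x.toList.length : Nat) : Int), ⟨⟨by push_cast; omega, by rw [hn]; exact_mod_cast by omega⟩, ?_⟩, ?_⟩
    all_goals {
      have hsl : (PySem.Str.slice text (some (pre.length : Int))
          (some ((pre.length + x.toList.length : Nat) : Int))).toList = x.toList := by
        rw [hslice _ _ (by positivity) (by positivity)]
        simp only [Int.toNat_natCast]
        rw [show (pre.length + x.toList.length) - pre.length = x.toList.length by omega]
        rw [← hdecomp, List.append_assoc, List.drop_left, List.take_left]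
      first
      | (rw [hsl]; exact hq)
      | (exact (String.toList_injective hsl))
    }

-- ===== VERDICT (by name: the statement is the Claim_ definition above) =====
theorem smallest_substring_spec : Claim_equal_smallest_substring := by
  intro text _
  unfold Spec_smallest_substring smallest_substring smallest_substring_alt
  cases hout : bOuter text.toList none with
  | none =>
    have hnone := (pv_bOuter_none text.toList none).mp hout
    have hres : aRes text = [] := by
      rw [List.eq_nil_iff_forall_not_mem]
      intro x hx
      obtain ⟨hinf, hq⟩ := (pv_mem_aRes text x).mp hx
      obtain ⟨t, hpre, hsuf⟩ := List.infix_iff_prefix_suffix.mp hinf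
      have hxne : x.toList ≠ [] := by
        intro h; rw [h] at hq; simp [pvQb] at hq
      have htne : t ≠ [] := by
        intro h; rw [h] at hpre; exact hxne (List.prefix_nil.mp hpre)
      exact pv_cand_none t (hnone.2 t hsuf htne) x.toList hpre hq
    simp [hres]
  | some m =>
    obtain ⟨hmem, _, hminsuf⟩ := pv_bOuter_some text.toList none m hout
    have hm : ∃ t, t <:+ text.toList ∧ bFind t [] 0 0 0 = some m := by
      rcases hmem with h | h
      · exact h
      · simp at h
    obtain ⟨t, hts, htf⟩ := hm
    obtain ⟨hmt, hqm, _⟩ := pv_cand_some t m htf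
    have hmemA : (String.ofList m) ∈ aRes text := by
      rw [pv_mem_aRes]
      rw [String.toList_ofList]
      exact ⟨List.infix_iff_prefix_suffix.mpr ⟨t, hmt, hts⟩, hqm⟩
    have hne : aRes text ≠ [] := fun h => by rw [h] at hmemA; simp at hmemA
    have hlen : ¬ (PySem.List.len (aRes text) = 0) := by
      simp [PySem.List.len_eq]
      exact hne
    rw [if_neg hlen]
    cases hmin : PySem.List.min? (aRes text) (fun x => x) with
    | none => exact absurd ((PySem.List.min?_eq_none_iff _ _).mp hmin) hne
    | some m' =>
      have hm'mem := PySem.List.min?_mem hmin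
      have hm'min := PySem.List.min?_isMin hmin
      -- m' ≤ ofList m
      have hle1 : m'.toList ≤ m := by
        have := hm'min _ hmemA
        have h2 := String.le_iff_toList_le.mp this
        rwa [String.toList_ofList] at h2
      have hle2 : m ≤ m'.toList := by
        obtain ⟨hinf', hq'⟩ := (pv_mem_aRes text m').mp hm'mem
        obtain ⟨t', hpre', hsuf'⟩ := List.infix_iff_prefix_suffix.mp hinf'
        cases hft' : bFind t' [] 0 0 0 with
        | none => exact absurd (pv_cand_none t' hft' m'.toList hpre' hq') (by simp)
        | some c =>
          obtain ⟨_, _, hminc⟩ := pv_cand_some t' c hft'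
          exact (hminsuf t' c hsuf' hft').trans (hminc m'.toList hpre' hq')
      have heq : m'.toList = m := le_antisymm hle1 hle2
      have : PySem.Str.len m' = (m.length : Int) := by
        rw [PySem.Str.len_eq, ← heq, String.length_toList]
      simp only [this]
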